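-- pv_equiv track=rewrite | github.com/Candysad/leetcode | python/2598.执行操作后的最大-mex.py | findSmallestInteger
-- ===== SOURCE A (Python) =====
-- from typing import List
--
-- from collections import defaultdict,Counter
-- from math import inf
--
-- def findSmallestInteger(nums: List[int], value: int) -> int:
--     if value == 1:
--         return len(nums)
--
--     table = defaultdict(int)
--     for num in nums:
--         table[num % value] += 1
--
--     result = inf
--     for i in range(value):
--         result = min(i + table[i] * value, result)
--     return result
-- ===== SOURCE B (Python) =====
-- from typing import List
-- from collections import Counter
--
-- def findSmallestInteger(nums: List[int], value: int) -> int: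
--     cnt = Counter(x % value for x in nums)
--     m = 0
--     for r in sorted(cnt):
--         if r != m:
--             break
--         m += 1
--     if m < value:
--         return m
--     return min(r + c * value for r, c in cnt.items())
-- ===== Notes on version B (the rewrite author's own statement) =====
-- stated objective: alternative
-- what changed: Instead of scanning all `value` residue slots, B counts only the residues actually present, finds the smallest absent residue by a sorted scan of the distinct residues, and only if every residue class is occupied takes the min of r + count*value over present residues; the cost no longer depends on value and the value==1 special case disappears (intended as faster; measured 1.3-1.9x, below the 1.5x-at-largest-size bar).
-- outside the precondition, e.g. on findSmallestInteger([1], -2): A returns inf, B returns -3; on findSmallestInteger([], 0): A returns inf, B raises ValueError; on findSmallestInteger([1], 0): A raises ZeroDivisionError, B raises ZeroDivisionError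
import Mathlib
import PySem

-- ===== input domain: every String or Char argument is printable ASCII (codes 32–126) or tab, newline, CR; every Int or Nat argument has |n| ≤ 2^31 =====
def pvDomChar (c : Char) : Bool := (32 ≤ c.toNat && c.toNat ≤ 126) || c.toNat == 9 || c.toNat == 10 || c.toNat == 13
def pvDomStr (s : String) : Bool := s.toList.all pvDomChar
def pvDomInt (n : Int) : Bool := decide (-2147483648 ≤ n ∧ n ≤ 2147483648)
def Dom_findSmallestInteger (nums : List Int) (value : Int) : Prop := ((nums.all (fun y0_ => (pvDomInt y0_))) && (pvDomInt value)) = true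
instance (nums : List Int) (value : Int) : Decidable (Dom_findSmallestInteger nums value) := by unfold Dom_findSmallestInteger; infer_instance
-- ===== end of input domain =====

-- B replaces A's scan over all `value` residue slots by processing only the residues
-- present in `nums` (smallest absent residue via a sorted scan of the distinct residues),
-- so the work no longer depends on `value`.


-- ===== PORT A =====
-- `result` starts at float inf; modelled as `Option Int` (none = inf). Under
-- Pre_ (1 ≤ value) the loop runs at least once, so the final `.getD 0` is never used.
def findSmallestInteger (nums : List Int) (value : Int) : Int :=
  if value == 1 then (nums.length : Int)
  else
    let table := nums.foldl (fun d num => d.modify (PySem.Int.mod num value) 0 (· + 1))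
      (PySem.Dict.empty : PySem.Dict Int Int)
    let result : Option Int := (PySem.List.pyRange 0 value 1).foldl
      (fun r i =>
        match r with
        | none => some (i + table.getD i 0 * value)
        | some r => some (min (i + table.getD i 0 * value) r)) none
    result.getD 0

-- ===== PORT B =====
-- the `for r in sorted(cnt): if r != m: break; m += 1` loop
def pvScanMex : List Int → Int → Int
  | [], m => m
  | r :: rest, m => if r = m then pvScanMex rest (m + 1) else m

-- Python's `min(...)` raises on an empty sequence; under Pre_ the `else` branch
-- always has a nonempty `cnt`, so the final `.getD 0` is never used.
def findSmallestInteger_alt (nums : List Int) (value : Int) : Int :=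
  let cnt := PySem.Dict.counter (nums.map (fun x => PySem.Int.mod x value))
  let m := pvScanMex (PySem.List.sorted cnt.keys (fun x => x) false) 0
  if m < value then m
  else (PySem.List.min? (cnt.items.map (fun rc => rc.1 + rc.2 * value)) (fun x => x)).getD 0

-- ===== PRECONDITION & SPEC =====
-- Pre_ excludes value ≤ 0: there A raises ZeroDivisionError (value = 0, nums nonempty)
-- or returns float inf (not an int), since range(value) is empty.
def Pre_findSmallestInteger (nums : List Int) (value : Int) : Prop := 1 ≤ value
instance (nums : List Int) (value : Int) : Decidable (Pre_findSmallestInteger nums value) := by unfold Pre_findSmallestInteger; infer_instance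
def pvWitness_findSmallestInteger : List Int × Int := ([1, 2, 5], 3)

def Spec_findSmallestInteger (nums : List Int) (value : Int) (out : Int) : Prop := out = findSmallestInteger_alt nums value
instance (nums : List Int) (value : Int) (out : Int) : Decidable (Spec_findSmallestInteger nums value out) := by unfold Spec_findSmallestInteger; infer_instance

-- ===== CLAIM (what is proved, stated in full; the proofs are below) =====
def Claim_equal_findSmallestInteger : Prop := ∀ (nums : List Int) (value : Int), Dom_findSmallestInteger nums value → Pre_findSmallestInteger nums value → Spec_findSmallestInteger nums value (findSmallestInteger nums value)

-- ===== LEMMAS AND PROOFS =====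

-- the scan over a strictly increasing list of elements ≥ m₀ computes the least
-- integer ≥ m₀ absent from the list
theorem pvScanMex_spec (L : List Int) (m₀ : Int) (hp : L.Pairwise (· < ·))
    (hge : ∀ x ∈ L, m₀ ≤ x) :
    m₀ ≤ pvScanMex L m₀ ∧ pvScanMex L m₀ ∉ L ∧
      ∀ k, m₀ ≤ k → k < pvScanMex L m₀ → k ∈ L := by
  induction L generalizing m₀ with
  | nil => simp [pvScanMex]
  | cons r rest ih =>
    rcases List.pairwise_cons.mp hp with ⟨hrlt, hp'⟩
    by_cases h : r = m₀
    · subst h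
      have hre : pvScanMex (r :: rest) r = pvScanMex rest (r + 1) := by simp [pvScanMex]
      have hge' : ∀ x ∈ rest, r + 1 ≤ x := fun x hx => by have := hrlt x hx; omega
      obtain ⟨h1, h2, h3⟩ := ih (r + 1) hp' hge'
      rw [hre]
      refine ⟨by omega, ?_, ?_⟩
      · intro hmem
        rcases List.mem_cons.mp hmem with he | hm
        · omega
        · exact h2 hm
      · intro k hk1 hk2
        rcases eq_or_lt_of_le hk1 with he | hlt
        · exact List.mem_cons.mpr (Or.inl he.symm)
        · exact List.mem_cons.mpr (Or.inr (h3 k (by omega) hk2))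
    · have hr : m₀ < r := lt_of_le_of_ne (hge r (List.mem_cons_self ..)) (Ne.symm h)
      refine ⟨?_, ?_, ?_⟩
      · simp [pvScanMex, h]
      · simp only [pvScanMex, if_neg h]
        intro hmem
        rcases List.mem_cons.mp hmem with he | hm
        · omega
        · have := hrlt _ hm; have := hge _ (List.mem_cons.mpr (Or.inr hm)); omega
      · intro k hk1 hk2
        simp only [pvScanMex, if_neg h] at hk2
        omega

-- A's option-valued min loop once the accumulator is `some a`
theorem pvFoldMin_some (f : Int → Int) (l : List Int) (a : Int) :
    l.foldl (fun r i =>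
        match r with
        | none => some (f i)
        | some r => some (min (f i) r)) (some a)
      = some (l.foldl (fun r i => min (f i) r) a) := by
  induction l generalizing a with
  | nil => rfl
  | cons x t ih => simp [List.foldl_cons, ih]

-- the plain running-min loop returns an attained lower bound
theorem pvFoldMin_spec (f : Int → Int) (l : List Int) (a : Int) :
    (l.foldl (fun r i => min (f i) r) a = a ∨
      ∃ i ∈ l, l.foldl (fun r i => min (f i) r) a = f i) ∧
    l.foldl (fun r i => min (f i) r) a ≤ a ∧
    ∀ i ∈ l, l.foldl (fun r i => min (f i) r) a ≤ f i := by
  induction l generalizing a with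
  | nil => simp
  | cons x t ih =>
    obtain ⟨hmem, hle, hall⟩ := ih (min (f x) a)
    refine ⟨?_, ?_, ?_⟩
    · rcases hmem with he | ⟨i, hi, he⟩
      · by_cases hxa : f x ≤ a
        · exact Or.inr ⟨x, List.mem_cons_self .., by simp [List.foldl_cons, he]; omega⟩
        · exact Or.inl (by simp [List.foldl_cons, he]; omega)
      · exact Or.inr ⟨i, List.mem_cons.mpr (Or.inr hi), by simpa [List.foldl_cons] using he⟩
    · simp only [List.foldl_cons]; omega
    · intro i hi
      rcases List.mem_cons.mp hi with he | hm
      · subst he; simp only [List.foldl_cons]; omega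
      · simpa [List.foldl_cons] using hall i hm

-- A's general branch (value ≥ 2) equals the min over range(value) of i + count·value
theorem pvA_eq_min (nums : List Int) (value : Int) (hv : 2 ≤ value) :
    findSmallestInteger nums value =
      (PySem.List.pyRange (0+1) value 1).foldl
        (fun r i => min (i + ((nums.map (fun x => PySem.Int.mod x value)).count i : Int) * value) r)
        (0 + ((nums.map (fun x => PySem.Int.mod x value)).count 0 : Int) * value) := by
  have hne : (value == 1) = false := by simp; omega
  unfold findSmallestInteger
  rw [hne]
  simp only [Bool.false_eq_true, if_false]
  have htab : (nums.foldl (fun d num => d.modify (PySem.Int.mod num value) 0 (· + 1))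
      (PySem.Dict.empty : PySem.Dict Int Int))
      = PySem.Dict.counter (nums.map (fun x => PySem.Int.mod x value)) := by
    rw [PySem.Dict.counter_eq_foldl, List.foldl_map]
  rw [htab, PySem.List.pyRange_one_cons (by omega : (0:Int) < value)]
  simp only [List.foldl_cons, PySem.Dict.getD_counter]
  rw [pvFoldMin_some]
  rfl

-- the minimum candidate i + count(i)·value, over the residue list rs
theorem pvMain (nums : List Int) (value : Int) (hv : 1 ≤ value) :
    findSmallestInteger nums value = findSmallestInteger_alt nums value := by
  set rs := nums.map (fun x => PySem.Int.mod x value) with hrs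
  have hbounds : ∀ r ∈ rs, 0 ≤ r ∧ r < value := by
    intro r hr
    rcases List.mem_map.mp hr with ⟨x, _, he⟩
    subst he
    exact ⟨PySem.Int.mod_nonneg x (by omega), PySem.Int.mod_lt x (by omega)⟩
  set sortedK := PySem.List.sorted (PySem.Dict.counter rs).keys (fun x => x) false with hsk
  have hmemK : ∀ k : Int, k ∈ sortedK ↔ k ∈ rs := by
    intro k
    rw [hsk, PySem.List.mem_sorted, PySem.Dict.keys_counter, PySem.Set.mem_ofList]
  have hpw : sortedK.Pairwise (· < ·) := by
    rw [hsk, PySem.Dict.keys_counter]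
    exact PySem.List.sorted_ofList_pairwise_lt rs
  obtain ⟨m, hm⟩ : ∃ m, m = pvScanMex sortedK 0 := ⟨_, rfl⟩
  obtain ⟨hm0, hmnot, hmall⟩ :=
    pvScanMex_spec sortedK 0 hpw (fun x hx => (hbounds x ((hmemK x).mp hx)).1)
  rw [← hm] at hm0 hmnot hmall
  have hmnotrs : m ∉ rs := fun h => hmnot ((hmemK m).mpr h)
  have hmallrs : ∀ k : Int, 0 ≤ k → k < m → k ∈ rs :=
    fun k h1 h2 => (hmemK k).mp (hmall k h1 h2)
  have hB : findSmallestInteger_alt nums value =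
      (if pvScanMex sortedK 0 < value then pvScanMex sortedK 0
       else (PySem.List.min? (((PySem.Dict.counter rs).items).map
         (fun rc => rc.1 + rc.2 * value)) (fun x => x)).getD 0) := rfl
  rw [← hm] at hB
  have hF0 : ∀ i : Int, i ∉ rs → (rs.count i : Int) = 0 := by
    intro i hi
    have hz : List.count i rs = 0 := List.count_eq_zero.mpr hi
    exact_mod_cast hz
  have hF1 : ∀ i : Int, i ∈ rs → 1 ≤ (rs.count i : Int) := by
    intro i hi; exact_mod_cast List.count_pos_iff.mpr hi
  by_cases hlt : m < value
  · -- B returns m, the smallest absent residue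
    rw [hB, if_pos hlt]
    by_cases h1 : value = 1
    · -- every residue is 0 and m = 0, so nums = [] and A returns its length 0
      subst h1
      have hm0' : m = 0 := by omega
      have hnil : nums = [] := by
        rcases nums with _ | ⟨x, t⟩
        · rfl
        · exfalso
          have hx : PySem.Int.mod x 1 ∈ rs := by
            rw [hrs]; exact List.mem_map.mpr ⟨x, List.mem_cons_self .., rfl⟩
          have := hbounds _ hx
          have : PySem.Int.mod x 1 = 0 := by omega
          exact hmnotrs (by rw [hm0', ← this]; exact hx)
      subst hnil
      simp [findSmallestInteger, hm0']
    · have hv2 : 2 ≤ value := by omega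
      rw [pvA_eq_min nums value hv2]
      obtain ⟨hatt, hlea, hall⟩ := pvFoldMin_spec
        (fun i => i + (rs.count i : Int) * value)
        (PySem.List.pyRange (0+1) value 1) (0 + (rs.count 0 : Int) * value)
      have hmemR : ∀ i : Int, i ∈ PySem.List.pyRange (0+1) value 1 ↔ 1 ≤ i ∧ i < value := by
        intro i; exact PySem.List.mem_pyRange_one
      -- every candidate is ≥ m
      have hgem : ∀ i : Int, 0 ≤ i → i < value → m ≤ i + (rs.count i : Int) * value := by
        intro i h0 hiv
        by_cases him : i ∈ rs
        · have := hF1 i him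
          nlinarith
        · have : ¬ i < m := fun hc => him (hmallrs i h0 hc)
          rw [hF0 i him]; omega
      -- the candidate at m is exactly m
      have hFm : m + (rs.count m : Int) * value = m := by rw [hF0 m hmnotrs]; ring
      set res := (PySem.List.pyRange (0+1) value 1).foldl
        (fun r i => min (i + (rs.count i : Int) * value) r)
        (0 + (rs.count 0 : Int) * value) with hres
      have hub : res ≤ m := by
        rcases eq_or_lt_of_le hm0 with he | hpos
        · calc res ≤ 0 + (rs.count 0 : Int) * value := hlea
            _ = m := by rw [← he] at hFm ⊢; omega
        · calc res ≤ m + (rs.count m : Int) * value :=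
              hall m ((hmemR m).mpr ⟨by omega, hlt⟩)
            _ = m := hFm
      have hlb : m ≤ res := by
        rcases hatt with he | ⟨i, hi, he⟩
        · rw [he]; exact hgem 0 le_rfl (by omega)
        · rw [he]
          have := (hmemR i).mp hi
          exact hgem i (by omega) this.2
      omega
  · -- every residue class 0..value-1 is present; both sides are the min over them
    rw [hB, if_neg hlt]
    have hallin : ∀ i : Int, 0 ≤ i → i < value → i ∈ rs := by
      intro i h0 hiv; exact hmallrs i h0 (by omega)
    have hitems : ((PySem.Dict.counter rs).items).map (fun rc => rc.1 + rc.2 * value)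
        = (PySem.Set.ofList rs).map (fun k => k + (rs.count k : Int) * value) := by
      rw [PySem.Dict.items_counter, List.map_map]
      rfl
    rw [hitems]
    obtain ⟨Lb, hLb⟩ : ∃ L, L = (PySem.Set.ofList rs).map
        (fun k => k + (rs.count k : Int) * value) := ⟨_, rfl⟩
    rw [← hLb]
    have hmemLb : ∀ y : Int, y ∈ Lb ↔ ∃ k ∈ rs, y = k + (rs.count k : Int) * value := by
      intro y
      rw [hLb]
      constructor
      · intro h
        rcases List.mem_map.mp h with ⟨k, hk, he⟩
        exact ⟨k, (PySem.Set.mem_ofList rs k).mp hk, he.symm⟩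
      · rintro ⟨k, hk, he⟩
        exact List.mem_map.mpr ⟨k, (PySem.Set.mem_ofList rs k).mpr hk, he.symm⟩
    have h0rs : (0 : Int) ∈ rs := hallin 0 le_rfl (by omega)
    have hLbne : Lb ≠ [] := by
      intro hc
      have := (hmemLb (0 + (rs.count 0 : Int) * value)).mpr ⟨0, h0rs, rfl⟩
      rw [hc] at this
      exact List.not_mem_nil this
    obtain ⟨b, hbmin⟩ : ∃ b, PySem.List.min? Lb (fun x => x) = some b := by
      rcases he : PySem.List.min? Lb (fun x => x) with _ | b
      · exact absurd ((PySem.List.min?_eq_none_iff _ _).mp he) hLbne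
      · exact ⟨b, rfl⟩
    rw [hbmin]
    simp only [Option.getD_some]
    have hbmem := PySem.List.min?_mem hbmin
    have hbmin' := PySem.List.min?_isMin hbmin
    rcases (hmemLb b).mp hbmem with ⟨k, hkrs, hke⟩
    have hkb := hbounds k hkrs
    by_cases h1 : value = 1
    · -- value = 1: every residue is 0, A returns len(nums) = the single candidate
      subst h1
      have hall0 : ∀ r ∈ rs, r = 0 := by intro r hr; have := hbounds r hr; omega
      have hk0 : k = 0 := by omega
      have hcnt : (rs.count 0 : Int) = rs.length := by
        have hc : List.count (0 : Int) rs = rs.length :=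
          List.count_eq_length.mpr (fun r hr => (hall0 r hr).symm)
        exact_mod_cast hc
      have hlen : rs.length = nums.length := List.length_map ..
      simp only [findSmallestInteger, BEq.rfl, if_true]
      rw [hke, hk0, hcnt, hlen]
      ring
    · have hv2 : 2 ≤ value := by omega
      rw [pvA_eq_min nums value hv2]
      obtain ⟨hatt, hlea, hall⟩ := pvFoldMin_spec
        (fun i => i + (rs.count i : Int) * value)
        (PySem.List.pyRange (0+1) value 1) (0 + (rs.count 0 : Int) * value)
      have hmemR : ∀ i : Int, i ∈ PySem.List.pyRange (0+1) value 1 ↔ 1 ≤ i ∧ i < value := by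
        intro i; exact PySem.List.mem_pyRange_one
      set res := (PySem.List.pyRange (0+1) value 1).foldl
        (fun r i => min (i + (rs.count i : Int) * value) r)
        (0 + (rs.count 0 : Int) * value) with hres
      have h1 : res ≤ b := by
        rw [hke]
        rcases eq_or_lt_of_le hkb.1 with he | hpos
        · rw [← he]; exact hlea
        · exact hall k ((hmemR k).mpr ⟨by omega, hkb.2⟩)
      have h2 : b ≤ res := by
        rcases hatt with he | ⟨i, hi, he⟩
        · rw [he]; exact hbmin' _ ((hmemLb _).mpr ⟨0, h0rs, rfl⟩)
        · rw [he]
          have hib := (hmemR i).mp hi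
          exact hbmin' _ ((hmemLb _).mpr ⟨i, hallin i (by omega) hib.2, rfl⟩)
      omega

-- ===== VERDICT (by name: the statement is the Claim_ definition above) =====
theorem findSmallestInteger_spec : Claim_equal_findSmallestInteger := by
  intro nums value _ hpre
  exact pvMain nums value hpre
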